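-- pv_equiv track=rewrite | github.com/ANIRUDDH-001/NagarikAI | backend/pipeline/run_cleaning_pipeline.py | prioritize_schemes
-- ===== SOURCE A (Python) =====
-- from typing import List, Dict, Any
--
-- def prioritize_schemes(schemes: List[Dict], tier1_data: List[Dict]) -> List[Dict]:
--     tier1_names = {str(t.get("scheme_name", "")).strip().lower() for t in tier1_data}
--
--     tier1_list = []
--     national_list = []
--     state_list = []
--
--     for s in schemes:
--         name_clean = str(s.get("scheme_name", "")).strip().lower()
--         state_clean = str(s.get("state", "")).strip().lower()
--
--         if name_clean in tier1_names:
--             tier1_list.append(s)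
--         elif state_clean == "national" or state_clean == "central":
--             national_list.append(s)
--         else:
--             state_list.append(s)
--
--     # Combine in priority order
--     prioritized = tier1_list + national_list + state_list
--     return prioritized
-- ===== SOURCE B (Python) =====
-- def prioritize_schemes(schemes, tier1_data):
--     tier1_names = {str(t.get("scheme_name", "")).strip().lower() for t in tier1_data}
--
--     def rank(s):
--         if str(s.get("scheme_name", "")).strip().lower() in tier1_names:
--             return 0
--         if str(s.get("state", "")).strip().lower() in ("national", "central"):
--             return 1
--         return 2
--
--     return sorted(schemes, key=rank)
-- ===== Notes on version B (the rewrite author's own statement) =====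
-- stated objective: alternative
-- what changed: Replaces the one-pass three-bucket partition (three accumulator lists concatenated at the end) with a rank function (0 = tier1, 1 = national/central, 2 = state) and a single stable sorted(schemes, key=rank), relying on sort stability to preserve intra-class input order.
import Mathlib
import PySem

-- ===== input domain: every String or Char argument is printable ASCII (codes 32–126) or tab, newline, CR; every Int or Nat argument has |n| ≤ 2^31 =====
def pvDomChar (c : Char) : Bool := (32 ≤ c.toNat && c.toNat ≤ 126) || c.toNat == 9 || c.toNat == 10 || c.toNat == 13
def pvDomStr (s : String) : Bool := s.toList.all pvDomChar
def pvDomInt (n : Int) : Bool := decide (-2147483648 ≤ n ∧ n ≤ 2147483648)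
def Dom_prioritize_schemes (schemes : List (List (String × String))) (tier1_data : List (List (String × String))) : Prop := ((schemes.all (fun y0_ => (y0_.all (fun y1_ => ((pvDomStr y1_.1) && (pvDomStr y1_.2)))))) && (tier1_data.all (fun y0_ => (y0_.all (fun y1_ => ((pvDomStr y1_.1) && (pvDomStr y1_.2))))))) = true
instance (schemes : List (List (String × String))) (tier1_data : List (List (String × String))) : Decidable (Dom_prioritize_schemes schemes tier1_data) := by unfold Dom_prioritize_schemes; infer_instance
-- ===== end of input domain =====

-- B replaces A's one-pass three-bucket partition by a rank function and one stable key-based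
-- sort; same return value (alternative decomposition, no speed claim).

-- x.get(k, "") on an association-list dict
def pvGetD (s : List (String × String)) (k : String) (d : String) : String :=
  PySem.Dict.getD ⟨s⟩ k d

-- str(…).strip().lower() — the cleaning expression both Pythons use
def pvClean (v : String) : String := PySem.Str.lower (PySem.Str.strip v)

-- ===== PORT A =====
-- the body of A's for-loop: appends s to the tier1 / national / state accumulator
def pvStep (tier1_names : PySem.Set String)
    (acc : List (List (String × String)) × List (List (String × String)) × List (List (String × String)))
    (s : List (String × String)) :
    List (List (String × String)) × List (List (String × String)) × List (List (String × String)) :=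
  let name_clean := pvClean (pvGetD s "scheme_name" "")
  let state_clean := pvClean (pvGetD s "state" "")
  if PySem.Set.contains tier1_names name_clean then
    (acc.1 ++ [s], acc.2.1, acc.2.2)
  else if state_clean == "national" || state_clean == "central" then
    (acc.1, acc.2.1 ++ [s], acc.2.2)
  else
    (acc.1, acc.2.1, acc.2.2 ++ [s])

def prioritize_schemes (schemes : List (List (String × String))) (tier1_data : List (List (String × String))) : List (List (String × String)) :=
  let tier1_names : PySem.Set String :=
    PySem.Set.ofList (tier1_data.map (fun t => pvClean (pvGetD t "scheme_name" "")))
  let acc := schemes.foldl (pvStep tier1_names) ([], [], [])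
  acc.1 ++ (acc.2.1 ++ acc.2.2)

-- ===== PORT B =====
-- Source B's rank helper: 0 = tier1, 1 = national/central, 2 = everything else
def pvRank (tier1_names : PySem.Set String) (s : List (String × String)) : Nat :=
  if PySem.Set.contains tier1_names (pvClean (pvGetD s "scheme_name" "")) then 0
  else if pvClean (pvGetD s "state" "") == "national" ||
          pvClean (pvGetD s "state" "") == "central" then 1
  else 2

def prioritize_schemes_alt (schemes : List (List (String × String))) (tier1_data : List (List (String × String))) : List (List (String × String)) :=
  let tier1_names : PySem.Set String :=
    PySem.Set.ofList (tier1_data.map (fun t => pvClean (pvGetD t "scheme_name" "")))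
  PySem.List.sorted schemes (pvRank tier1_names) false

-- ===== PRECONDITION & SPEC =====
def Spec_prioritize_schemes (schemes : List (List (String × String))) (tier1_data : List (List (String × String))) (out : List (List (String × String))) : Prop := out = prioritize_schemes_alt schemes tier1_data
instance (schemes : List (List (String × String))) (tier1_data : List (List (String × String))) (out : List (List (String × String))) : Decidable (Spec_prioritize_schemes schemes tier1_data out) := by unfold Spec_prioritize_schemes; infer_instance

-- ===== CLAIM (what is proved, stated in full; the proofs are below) =====
def Claim_equal_prioritize_schemes : Prop := ∀ (schemes : List (List (String × String))) (tier1_data : List (List (String × String))), Dom_prioritize_schemes schemes tier1_data → Spec_prioritize_schemes schemes tier1_data (prioritize_schemes schemes tier1_data)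

-- ===== LEMMAS AND PROOFS =====

-- inserting x between a prefix it does not go before and a suffix it goes before
theorem pvInsertBy_partition {α : Type} (before : α → α → Bool) (x : α) (ys zs : List α)
    (hy : ∀ y ∈ ys, before x y = false) (hz : ∀ z ∈ zs, before x z = true) :
    PySem.List.insertBy before x (ys ++ zs) = ys ++ x :: zs := by
  induction ys with
  | nil =>
    cases zs with
    | nil => rfl
    | cons z zs => simp [PySem.List.insertBy, hz z (by simp)]
  | cons y ys ih =>
    have hy0 : before x y = false := hy y (by simp)
    simp only [List.cons_append, PySem.List.insertBy, hy0]
    simp only [Bool.false_eq_true, if_false, List.cons.injEq, true_and]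
    exact ih (fun y' h' => hy y' (List.mem_cons_of_mem _ h'))

-- a stable sort by a key into {0,1,2} is the concatenation of the three class filters
theorem pvSorted3 {α : Type} (key : α → Nat) (hk : ∀ x, key x ≤ 2) (xs : List α) :
    PySem.List.sorted xs key false =
      xs.filter (fun a => key a == 0) ++
        (xs.filter (fun a => key a == 1) ++ xs.filter (fun a => key a == 2)) := by
  induction xs using List.reverseRecOn with
  | nil => rfl
  | append_singleton xs x ih =>
    have hins : PySem.List.sorted (xs ++ [x]) key false =
        PySem.List.insertBy (fun a b => decide (key a < key b)) x (PySem.List.sorted xs key false) := by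
      rw [PySem.List.sorted_eq_foldl_insertBy, PySem.List.sorted_eq_foldl_insertBy, List.foldl_append]
      rfl
    rw [hins, ih]
    have hx3 : key x = 0 ∨ key x = 1 ∨ key x = 2 := by have := hk x; omega
    rcases hx3 with h | h | h
    · rw [pvInsertBy_partition _ x (xs.filter (fun a => key a == 0))
        ((xs.filter (fun a => key a == 1) ++ xs.filter (fun a => key a == 2)))
        (by intro y hy; simp only [List.mem_filter, beq_iff_eq] at hy; simp [h, hy.2])
        (by intro z hz; simp only [List.mem_append, List.mem_filter, beq_iff_eq] at hz
            rcases hz with hz | hz <;> simp [h, hz.2])]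
      simp [List.filter_append, h]
    · rw [← List.append_assoc]
      rw [pvInsertBy_partition _ x
        (xs.filter (fun a => key a == 0) ++ xs.filter (fun a => key a == 1))
        (xs.filter (fun a => key a == 2))
        (by intro y hy; simp only [List.mem_append, List.mem_filter, beq_iff_eq] at hy
            rcases hy with hy | hy <;> simp [h, hy.2])
        (by intro z hz; simp only [List.mem_filter, beq_iff_eq] at hz; simp [h, hz.2])]
      simp [List.filter_append, h]
    · have hall : ∀ y ∈ (xs.filter (fun a => key a == 0) ++
          (xs.filter (fun a => key a == 1) ++ xs.filter (fun a => key a == 2))),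
          (decide (key x < key y)) = false := by
        intro y hy
        simp only [List.mem_append, List.mem_filter, beq_iff_eq] at hy
        rcases hy with hy | hy | hy <;> simp [h, hy.2]
      rw [PySem.List.insertBy_of_forall_not_before _ _ _ hall]
      simp [List.filter_append, h]

-- A's loop, from arbitrary accumulators, produces the three rank-class filters
theorem pvFoldA (T : PySem.Set String) (xs : List (List (String × String)))
    (t n st : List (List (String × String))) :
    xs.foldl (pvStep T) (t, n, st) =
      (t ++ xs.filter (fun s => pvRank T s == 0),
       n ++ xs.filter (fun s => pvRank T s == 1),
       st ++ xs.filter (fun s => pvRank T s == 2)) := by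
  induction xs generalizing t n st with
  | nil => simp
  | cons x xs ih =>
    simp only [List.foldl_cons]
    by_cases h1 : pvClean (pvGetD x "scheme_name" "") ∈ (T : List String)
    · have hstep : pvStep T (t, n, st) x = (t ++ [x], n, st) := by simp [pvStep, h1]
      have hr : pvRank T x = 0 := by simp [pvRank, h1]
      rw [hstep, ih]
      simp [hr]
    · by_cases h2 : (pvClean (pvGetD x "state" "") == "national" ||
          pvClean (pvGetD x "state" "") == "central") = true
      · have hstep : pvStep T (t, n, st) x = (t, n ++ [x], st) := by simp [pvStep, h1, h2]
        have hr : pvRank T x = 1 := by simp [pvRank, h1, h2]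
        rw [hstep, ih]
        simp [hr]
      · have hstep : pvStep T (t, n, st) x = (t, n, st ++ [x]) := by simp [pvStep, h1, h2]
        have hr : pvRank T x = 2 := by simp [pvRank, h1, h2]
        rw [hstep, ih]
        simp [hr]

-- ===== VERDICT (by name: the statement is the Claim_ definition above) =====
theorem prioritize_schemes_spec : Claim_equal_prioritize_schemes := by
  intro schemes tier1_data _
  simp only [Spec_prioritize_schemes, prioritize_schemes, prioritize_schemes_alt]
  rw [pvSorted3 _ (fun s => by unfold pvRank; split_ifs <;> omega)]
  rw [pvFoldA]
  simp
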